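-- pv_equiv track=rewrite | github.com/radicalalpaca/python-pc | lectures/compmath/mm19lc2_4.py | hornerderiv
-- ===== SOURCE A (Python) =====
-- def horner(x, coeffs):
--     coeffs.reverse()
--     b = 0
--     for a in coeffs:
--         b = a + x * b
--     return b
--
-- def hornerderiv(x, coeffs):
--     coeffs.reverse()
--     b = 0
--     Q_coeffs = []
--     for a in coeffs:
--         b = a + x * b
--         Q_coeffs.append(b)
--     P_x = Q_coeffs.pop()
--     Q_coeffs.reverse()
--     Q_x = horner(x, Q_coeffs)
--     return P_x, Q_x
-- ===== SOURCE B (Python) =====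
-- def hornerderiv(x, coeffs):
--     coeffs.reverse()
--     p = coeffs[0]
--     d = 0
--     for a in coeffs[1:]:
--         d = d * x + p
--         p = p * x + a
--     return p, d
-- ===== Notes on version B (the rewrite author's own statement) =====
-- stated objective: simpler
-- what changed: One fused pass with two accumulators (value and derivative) replaces building the quotient-coefficient list, popping it and running Horner a second time over it.
import Mathlib
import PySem

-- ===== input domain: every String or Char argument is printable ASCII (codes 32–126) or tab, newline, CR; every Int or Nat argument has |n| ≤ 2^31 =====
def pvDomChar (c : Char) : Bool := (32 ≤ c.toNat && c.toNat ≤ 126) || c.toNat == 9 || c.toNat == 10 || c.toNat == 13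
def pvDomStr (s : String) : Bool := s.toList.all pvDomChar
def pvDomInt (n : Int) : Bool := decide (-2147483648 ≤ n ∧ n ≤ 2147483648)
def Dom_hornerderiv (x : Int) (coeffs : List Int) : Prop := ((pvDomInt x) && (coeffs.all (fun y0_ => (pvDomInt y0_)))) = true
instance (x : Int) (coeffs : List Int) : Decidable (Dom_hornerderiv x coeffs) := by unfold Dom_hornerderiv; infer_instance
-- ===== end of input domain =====

-- B replaces A's build-quotient-list-then-second-Horner-pass with one fused pass keeping two
-- accumulators (value, derivative); objective: simpler. Both reverse `coeffs` in place (same side effect).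
-- ===== PORT A =====
-- helper 'horner' (A's module helper): reverse then fold, as in the Python
def horner (x : Int) (coeffs : List Int) : Int :=
  coeffs.reverse.foldl (fun b a => a + x * b) 0

def hornerderiv (x : Int) (coeffs : List Int) : Int × Int :=
  let r := coeffs.reverse
  let s := r.foldl (fun (s : Int × List Int) a => (a + x * s.1, s.2 ++ [a + x * s.1])) (0, [])
  match s.2.getLast? with
  | none => (0, 0)  -- Python: Q_coeffs.pop() raises IndexError here; excluded by Pre_
  | some P_x =>
      let Q_coeffs := s.2.dropLast.reverse
      (P_x, horner x Q_coeffs)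

-- ===== PORT B =====
def hornerderiv_alt (x : Int) (coeffs : List Int) : Int × Int :=
  match coeffs.reverse with
  | [] => (0, 0)  -- Python: coeffs[0] raises IndexError here; excluded by Pre_
  | p0 :: rest =>
      rest.foldl (fun (pd : Int × Int) a => (pd.1 * x + a, pd.2 * x + pd.1)) (p0, 0)

-- ===== PRECONDITION & SPEC =====
-- Pre_ excludes only the empty coefficient list, on which A raises IndexError (pop from empty list).
def Pre_hornerderiv (_x : Int) (coeffs : List Int) : Prop := coeffs ≠ []
instance (x : Int) (coeffs : List Int) : Decidable (Pre_hornerderiv x coeffs) := by unfold Pre_hornerderiv; infer_instance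
def pvWitness_hornerderiv : Int × List Int := (3, [1, -2, 5])

def Spec_hornerderiv (x : Int) (coeffs : List Int) (out : Int × Int) : Prop := out = hornerderiv_alt x coeffs
instance (x : Int) (coeffs : List Int) (out : Int × Int) : Decidable (Spec_hornerderiv x coeffs out) := by unfold Spec_hornerderiv; infer_instance

-- ===== CLAIM (what is proved, stated in full; the proofs are below) =====
def Claim_equal_hornerderiv : Prop := ∀ (x : Int) (coeffs : List Int), Dom_hornerderiv x coeffs → Pre_hornerderiv x coeffs → Spec_hornerderiv x coeffs (hornerderiv x coeffs)

-- ===== LEMMAS AND PROOFS =====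

-- the list of successive Horner partial values (A's Q_coeffs)
def scanV (x : Int) : Int → List Int → List Int
  | _, [] => []
  | b, a :: t => (a + x * b) :: scanV x (a + x * b) t

theorem A_fold (x : Int) : ∀ (l : List Int) (b : Int) (Q : List Int),
    l.foldl (fun (s : Int × List Int) a => (a + x * s.1, s.2 ++ [a + x * s.1])) (b, Q)
      = (l.foldl (fun b a => a + x * b) b, Q ++ scanV x b l) := by
  intro l
  induction l with
  | nil => intro b Q; simp [scanV]
  | cons a t ih => intro b Q; simp [List.foldl, scanV, ih]

theorem lastScan (x : Int) : ∀ (l : List Int) (p : Int),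
    (p :: scanV x p l).getLast? = some (l.foldl (fun b a => a + x * b) p) := by
  intro l
  induction l with
  | nil => intro p; simp [scanV]
  | cons a t ih =>
      intro p
      show (p :: (a + x * p) :: scanV x (a + x * p) t).getLast? = _
      rw [List.getLast?_cons_cons]
      simpa [List.foldl] using ih (a + x * p)

theorem B_fold (x : Int) : ∀ (l : List Int) (p d : Int),
    l.foldl (fun (pd : Int × Int) a => (pd.1 * x + a, pd.2 * x + pd.1)) (p, d)
      = (l.foldl (fun b a => a + x * b) p,
         ((p :: scanV x p l).dropLast).foldl (fun b a => a + x * b) d) := by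
  intro l
  induction l with
  | nil => intro p d; simp [scanV]
  | cons a t ih =>
      intro p d
      show t.foldl _ (p * x + a, d * x + p) = _
      rw [ih]
      have h1 : p * x + a = a + x * p := by ring
      have h2 : d * x + p = p + x * d := by ring
      simp [scanV, h1, h2, List.foldl]

theorem hornerderiv_spec : Claim_equal_hornerderiv := by
  intro x coeffs _ hpre
  unfold Spec_hornerderiv hornerderiv hornerderiv_alt horner
  cases h : coeffs.reverse with
  | nil => exact absurd (List.reverse_eq_nil_iff.mp h) hpre
  | cons p0 rest =>
      simp only [A_fold, B_fold, List.reverse_reverse, scanV]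
      have h0 : p0 + x * 0 = p0 := by ring
      rw [h0, List.nil_append, lastScan]
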